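-- pv_equiv track=rewrite | github.com/Andy7yan/Where-does-CoT-peaks- | src/common/runtime_env.py | is_device_capability_supported
-- ===== SOURCE A (Python) =====
-- _EXCLUDED_FAMILY_COMPAT_CAPABILITIES = {
--     (8, 7),
--     (10, 1),
-- }
--
-- def is_device_capability_supported(
--     device_capability: tuple[int, int],
--     supported_cuda_arches: tuple[str, ...],
-- ) -> bool:
--     """Return whether the current PyTorch build should be able to execute on a GPU."""
--
--     if not supported_cuda_arches:
--         return True
--
--     normalized_arches = []
--     for raw_arch in supported_cuda_arches:
--         capability = _parse_arch_tag(raw_arch)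
--         if capability is not None:
--             normalized_arches.append(capability)
--     if not normalized_arches:
--         return True
--
--     if device_capability in normalized_arches:
--         return True
--     if device_capability in _EXCLUDED_FAMILY_COMPAT_CAPABILITIES:
--         return False
--
--     device_major, device_minor = device_capability
--     return any(
--         arch_major == device_major and arch_minor <= device_minor
--         for arch_major, arch_minor in normalized_arches
--     )
--
-- def _parse_arch_tag(raw_arch: str) -> tuple[int, int] | None:
--     normalized = raw_arch.strip().lower()
--     if "." in normalized:
--         major_text, _, minor_text = normalized.partition(".")
--         if major_text.isdigit() and minor_text.isdigit():
--             return int(major_text), int(minor_text)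
--         return None
--     if "_" in normalized:
--         normalized = normalized.split("_", 1)[1]
--     if len(normalized) < 2 or not normalized.isdigit():
--         return None
--     if len(normalized) == 2:
--         return int(normalized[0]), int(normalized[1])
--     return int(normalized[:-1]), int(normalized[-1])
-- ===== SOURCE B (Python) =====
-- _EXCLUDED_FAMILY_COMPAT_CAPABILITIES = {
--     (8, 7),
--     (10, 1),
-- }
--
-- def _parse_arch_tag(raw_arch):
--     normalized = raw_arch.strip().lower()
--     if "." in normalized:
--         major_text, _, minor_text = normalized.partition(".")
--         if major_text.isdigit() and minor_text.isdigit():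
--             return int(major_text), int(minor_text)
--         return None
--     if "_" in normalized:
--         normalized = normalized.split("_", 1)[1]
--     if len(normalized) < 2 or not normalized.isdigit():
--         return None
--     if len(normalized) == 2:
--         return int(normalized[0]), int(normalized[1])
--     return int(normalized[:-1]), int(normalized[-1])
--
-- def is_device_capability_supported(device_capability, supported_cuda_arches):
--     if not supported_cuda_arches:
--         return True
--
--     # One parsing pass builds an index: the set of exact capabilities and,
--     # per major version, the minimum minor seen for it.
--     exact = set()
--     min_minor = {}
--     for raw_arch in supported_cuda_arches:
--         capability = _parse_arch_tag(raw_arch)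
--         if capability is None:
--             continue
--         exact.add(capability)
--         major, minor = capability
--         if major not in min_minor or minor < min_minor[major]:
--             min_minor[major] = minor
--
--     if not exact:
--         return True
--     if device_capability in exact:
--         return True
--     if device_capability in _EXCLUDED_FAMILY_COMPAT_CAPABILITIES:
--         return False
--
--     device_major, device_minor = device_capability
--     return device_major in min_minor and min_minor[device_major] <= device_minor
-- ===== Notes on version B (the rewrite author's own statement) =====
-- stated objective: alternative
-- what changed: Replaces A's flat normalized list with its two linear membership scans ('in' plus any()) by an index built in the single parsing pass: a set of exact (major,minor) pairs and a dict mapping each major to the minimum minor seen, so the decision becomes set/dict lookups instead of list scans.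
import Mathlib
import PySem

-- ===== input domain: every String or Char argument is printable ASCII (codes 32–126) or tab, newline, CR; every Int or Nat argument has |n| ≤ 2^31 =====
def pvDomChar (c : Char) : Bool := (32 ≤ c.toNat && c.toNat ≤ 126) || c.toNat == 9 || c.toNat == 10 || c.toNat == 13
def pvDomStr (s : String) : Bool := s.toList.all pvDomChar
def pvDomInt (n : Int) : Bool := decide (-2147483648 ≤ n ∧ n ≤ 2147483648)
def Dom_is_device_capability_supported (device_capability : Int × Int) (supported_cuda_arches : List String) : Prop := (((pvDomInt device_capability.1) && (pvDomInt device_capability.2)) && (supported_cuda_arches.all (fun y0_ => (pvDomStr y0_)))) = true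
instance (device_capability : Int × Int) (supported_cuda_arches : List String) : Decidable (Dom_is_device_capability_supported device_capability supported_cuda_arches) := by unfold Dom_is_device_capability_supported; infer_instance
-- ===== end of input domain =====

-- B replaces A's flat list + two membership scans with an index (exact set + per-major minimum-minor dict); alternative structure, same results.

-- ===== PORT A =====
-- shared helper: literal port of _parse_arch_tag (used verbatim by both Pythons).
-- s.partition(".") / s.split("_", 1)[1] are ported by hand as span at the first
-- occurrence (exact, since the branch is guarded by "." in s resp. "_" in s);
-- int(t) under t.isdigit() is (PySem.Int.ofChars? t).getD 0 (the guard makes it exact).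
def parseArchTag (raw_arch : String) : Option (Int × Int) :=
  let s := PySem.Chars.lower (PySem.Chars.strip raw_arch.toList)
  if PySem.Chars.isIn ['.'] s then
    let major_text := s.takeWhile (· ≠ '.')
    let minor_text := (s.dropWhile (· ≠ '.')).drop 1
    if PySem.Chars.strIsdigit major_text && PySem.Chars.strIsdigit minor_text then
      some ((PySem.Int.ofChars? major_text).getD 0, (PySem.Int.ofChars? minor_text).getD 0)
    else none
  else
    let s2 := if PySem.Chars.isIn ['_'] s then (s.dropWhile (· ≠ '_')).drop 1 else s
    if s2.length < 2 || !PySem.Chars.strIsdigit s2 then none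
    else if s2.length == 2 then
      some ((PySem.Int.ofChars? (s2.take 1)).getD 0, (PySem.Int.ofChars? (s2.drop (s2.length - 1))).getD 0)
    else
      some ((PySem.Int.ofChars? (s2.take (s2.length - 1))).getD 0, (PySem.Int.ofChars? (s2.drop (s2.length - 1))).getD 0)

def is_device_capability_supported (device_capability : Int × Int) (supported_cuda_arches : List String) : Bool :=
  if supported_cuda_arches.isEmpty then true
  else
    let normalized_arches : List (Int × Int) :=
      supported_cuda_arches.foldl (fun acc raw_arch =>
        match parseArchTag raw_arch with
        | some capability => acc ++ [capability]
        | none => acc) []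
    if normalized_arches.isEmpty then true
    else if normalized_arches.contains device_capability then true
    else if device_capability == (8, 7) || device_capability == (10, 1) then false
    else normalized_arches.any (fun arch => arch.1 == device_capability.1 && decide (arch.2 ≤ device_capability.2))

-- ===== PORT B =====
-- one index-building step for a parsed capability: add to the exact set, keep the minimum minor per major
def pvIndexStep (st : PySem.Set (Int × Int) × PySem.Dict Int Int) (capability : Int × Int) :
    PySem.Set (Int × Int) × PySem.Dict Int Int :=
  let exact := PySem.Set.add st.1 capability
  let d :=
    match st.2.get? capability.1 with
    | none => st.2.insert capability.1 capability.2
    | some v => if capability.2 < v then st.2.insert capability.1 capability.2 else st.2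
  (exact, d)

def is_device_capability_supported_alt (device_capability : Int × Int) (supported_cuda_arches : List String) : Bool :=
  if supported_cuda_arches.isEmpty then true
  else
    let st :=
      supported_cuda_arches.foldl (fun st raw_arch =>
        match parseArchTag raw_arch with
        | some capability => pvIndexStep st capability
        | none => st) ((PySem.Set.empty : PySem.Set (Int × Int)), (PySem.Dict.empty : PySem.Dict Int Int))
    if st.1.isEmpty then true
    else if PySem.Set.contains st.1 device_capability then true
    else if device_capability == (8, 7) || device_capability == (10, 1) then false
    else
      match st.2.get? device_capability.1 with
      | some v => decide (v ≤ device_capability.2)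
      | none => false

-- ===== PRECONDITION & SPEC =====
def Spec_is_device_capability_supported (device_capability : Int × Int) (supported_cuda_arches : List String) (out : Bool) : Prop := out = is_device_capability_supported_alt device_capability supported_cuda_arches
instance (device_capability : Int × Int) (supported_cuda_arches : List String) (out : Bool) : Decidable (Spec_is_device_capability_supported device_capability supported_cuda_arches out) := by unfold Spec_is_device_capability_supported; infer_instance

-- ===== CLAIM (what is proved, stated in full; the proofs are below) =====
def Claim_equal_is_device_capability_supported : Prop := ∀ (device_capability : Int × Int) (supported_cuda_arches : List String), Dom_is_device_capability_supported device_capability supported_cuda_arches → Spec_is_device_capability_supported device_capability supported_cuda_arches (is_device_capability_supported device_capability supported_cuda_arches)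

-- ===== LEMMAS AND PROOFS =====

-- A's accumulating fold over the raw arches is append of the parseable ones
lemma foldA_eq_filterMap (arches : List String) (acc : List (Int × Int)) :
    arches.foldl (fun acc raw =>
      match parseArchTag raw with
      | some c => acc ++ [c]
      | none => acc) acc = acc ++ arches.filterMap parseArchTag := by
  induction arches generalizing acc with
  | nil => simp
  | cons h t ih =>
    simp only [List.foldl_cons, List.filterMap_cons]
    cases parseArchTag h <;> simp [ih]

-- B's fold over the raw arches is the index fold over the parseable ones
lemma foldB_eq_foldl_filterMap (arches : List String)
    (st : PySem.Set (Int × Int) × PySem.Dict Int Int) :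
    arches.foldl (fun st raw =>
      match parseArchTag raw with
      | some c => pvIndexStep st c
      | none => st) st = (arches.filterMap parseArchTag).foldl pvIndexStep st := by
  induction arches generalizing st with
  | nil => rfl
  | cons h t ih =>
    simp only [List.foldl_cons, List.filterMap_cons]
    cases parseArchTag h <;> simp [ih]

-- the first component of the index fold is set(ns) prefixed by the seed set
lemma fold_fst (ns : List (Int × Int)) (st : PySem.Set (Int × Int) × PySem.Dict Int Int) :
    (ns.foldl pvIndexStep st).1 = ns.foldl PySem.Set.add st.1 := by
  induction ns generalizing st with
  | nil => rfl
  | cons h t ih => simp [List.foldl_cons, ih, pvIndexStep]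

lemma foldl_add_ne_nil (ns : List (Int × Int)) (s : PySem.Set (Int × Int)) (hs : s ≠ []) :
    ns.foldl PySem.Set.add s ≠ [] := by
  induction ns generalizing s with
  | nil => exact hs
  | cons h t ih =>
    refine ih _ ?_
    simp only [PySem.Set.add]
    split
    · exact hs
    · simp

-- the dict lookup test over the index fold equals A's any-scan (plus the seed's test)
lemma fold_snd_test (ns : List (Int × Int)) (st : PySem.Set (Int × Int) × PySem.Dict Int Int)
    (k m : Int) :
    (match (ns.foldl pvIndexStep st).2.get? k with
     | some v => decide (v ≤ m)
     | none => false)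
    = (ns.any (fun a => a.1 == k && decide (a.2 ≤ m)) ||
       (match st.2.get? k with
        | some v => decide (v ≤ m)
        | none => false)) := by
  induction ns generalizing st with
  | nil => simp
  | cons h t ih =>
    simp only [List.foldl_cons, List.any_cons, ih]
    have hstep : (match (pvIndexStep st h).2.get? k with
        | some v => decide (v ≤ m)
        | none => false)
        = ((h.1 == k && decide (h.2 ≤ m)) ||
           (match st.2.get? k with
            | some v => decide (v ≤ m)
            | none => false)) := by
      by_cases hk : h.1 = k
      · subst hk
        simp only [pvIndexStep]
        cases hg : st.2.get? h.1 with
        | none => simp [PySem.Dict.get?_insert_self]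
        | some v =>
          by_cases hlt : h.2 < v
          · simp only [if_pos hlt, PySem.Dict.get?_insert_self]
            simp only [BEq.rfl, Bool.true_and]
            by_cases hm : h.2 ≤ m
            · simp [hm]
            · have : ¬ v ≤ m := by omega
              simp [hm, this]
          · simp only [if_neg hlt, hg]

            have : (decide (v ≤ m)) = ((decide (h.2 ≤ m)) || decide (v ≤ m)) := by
              by_cases hm : h.2 ≤ m
              · have : v ≤ m := by omega
                simp [hm, this]
              · simp [hm]
            simpa using this
      · have hne : (h.1 == k) = false := by simp [hk]
        have hget : (pvIndexStep st h).2.get? k = st.2.get? k := by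
          simp only [pvIndexStep]
          cases hg : st.2.get? h.1 with
          | none => exact PySem.Dict.get?_insert_of_ne st.2 h.2 (Ne.symm hk)
          | some v =>
            by_cases hlt : h.2 < v
            · simp only [if_pos hlt]
              exact PySem.Dict.get?_insert_of_ne st.2 h.2 (Ne.symm hk)
            · simp [hlt]
        simp only [hget, hne, Bool.false_and, Bool.false_or]
    rw [hstep]
    cases h.1 == k && decide (h.2 ≤ m) <;>
      cases t.any (fun a => a.1 == k && decide (a.2 ≤ m)) <;>
      cases (match st.2.get? k with | some v => decide (v ≤ m) | none => false) <;> simp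

-- ===== VERDICT (by name: the statement is the Claim_ definition above) =====
theorem is_device_capability_supported_spec : Claim_equal_is_device_capability_supported := by
  intro dc arches _
  unfold Spec_is_device_capability_supported
  unfold is_device_capability_supported is_device_capability_supported_alt
  by_cases he : arches.isEmpty
  · simp [he]
  · simp only [he, Bool.false_eq_true, if_false]
    rw [foldA_eq_filterMap, foldB_eq_foldl_filterMap]
    simp only [List.nil_append]
    generalize arches.filterMap parseArchTag = ns
    cases ns with
    | nil => simp [PySem.Set.empty]
    | cons x t =>
      have h1 : ((x :: t).foldl pvIndexStep ((PySem.Set.empty : PySem.Set (Int × Int)), (PySem.Dict.empty : PySem.Dict Int Int))).1 = PySem.Set.ofList (x :: t) := by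
        rw [fold_fst, PySem.Set.ofList_eq_foldl]; rfl
      have hne2 : ((x :: t).foldl pvIndexStep ((PySem.Set.empty : PySem.Set (Int × Int)), (PySem.Dict.empty : PySem.Dict Int Int))).1.isEmpty = false := by
        rw [h1, PySem.Set.ofList_eq_foldl]
        have h3 : List.foldl PySem.Set.add [] (x :: t) ≠ [] := by
          simp only [List.foldl_cons]
          exact foldl_add_ne_nil t _ (by simp [PySem.Set.add, PySem.Set.contains])
        cases hE : (List.foldl PySem.Set.add [] (x :: t)).isEmpty
        · rfl
        · exact absurd (List.isEmpty_iff.mp hE) h3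
      have hmem : ((x :: t).foldl pvIndexStep ((PySem.Set.empty : PySem.Set (Int × Int)), (PySem.Dict.empty : PySem.Dict Int Int))).1.contains dc = (x :: t).contains dc := by
        rw [h1]
        by_cases hm : dc ∈ x :: t
        · simp [hm, (PySem.Set.mem_ofList (x :: t) dc).mpr hm]
        · simp [hm]
      simp only [hne2, hmem, List.isEmpty_cons, Bool.false_eq_true, if_false]
      by_cases hc : (x :: t).contains dc
      · simp only [hc, if_true]
      · simp only [hc, Bool.false_eq_true, if_false]
        by_cases hx : (dc == ((8 : Int), (7 : Int)) || dc == ((10 : Int), (1 : Int))) = true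
        · simp only [hx, if_true]
        · simp only [hx, Bool.false_eq_true, if_false]
          rw [fold_snd_test]
          simp [PySem.Dict.empty, PySem.Dict.get?]
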